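-- pv_equiv track=rewrite | github.com/SentientPlatypus/HolidayCodeJam2022 | CandleLighting.py | candleLighting
-- ===== SOURCE A (Python) =====
-- def candleLighting(days:int) -> list[int]:
--     if days == 1:
--         return [10, 10, 10, 10, 10, 10, 10, 10, 10]
--     else:
--         candles = candleLighting(days - 1)
--
--         ## if the day is greater than 10, iterate up to index 9
--         upto = min(days - 1, 9)
--
--         ##iterate up to the correct index
--         for i in range(upto):
--
--             ##If candles[i] - 1 is less than 0, make it 0
--             candles[i] = max(candles[i] - 1, 0)
--
--         return candles
-- ===== SOURCE B (Python) =====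
-- def candleLighting(days: int) -> list[int]:
--     # Closed form: candle i has been decremented once per day after day i+1,
--     # i.e. days-i-1 times, clamped between 0 and 10.
--     return [max(min(11 - days + i, 10), 0) for i in range(9)]
-- ===== Notes on version B (the rewrite author's own statement) =====
-- stated objective: simpler
-- what changed: Replaces the O(days) recursion with per-day decrement loops by a one-line closed-form per-candle formula max(min(11-days+i,10),0); intended as asymptotically faster, but a timing run could not confirm it because A exceeds the recursion limit on large inputs.
import Mathlib
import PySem

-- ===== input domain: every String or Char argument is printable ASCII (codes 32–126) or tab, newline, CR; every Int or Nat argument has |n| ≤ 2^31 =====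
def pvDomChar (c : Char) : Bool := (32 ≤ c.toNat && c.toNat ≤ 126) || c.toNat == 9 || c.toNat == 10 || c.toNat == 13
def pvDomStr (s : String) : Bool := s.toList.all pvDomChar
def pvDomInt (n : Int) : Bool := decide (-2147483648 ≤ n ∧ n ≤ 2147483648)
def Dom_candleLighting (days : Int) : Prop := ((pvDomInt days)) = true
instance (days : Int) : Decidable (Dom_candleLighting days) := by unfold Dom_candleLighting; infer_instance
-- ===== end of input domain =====

-- B replaces A's O(days) recursion by the closed form max(min(11-days+i,10),0) per candle (simpler one-liner).
-- Pre_ excludes days < 1, where A recurses without reaching the base case (RecursionError).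


-- ===== PORT A =====
-- Literal port of A; the 'days ≤ 1' guard only makes the recursion total
-- (Python never reaches it inside Pre_: it recurses forever for days < 1).
def candleLighting (days : Int) : List Int :=
  if days = 1 then [10, 10, 10, 10, 10, 10, 10, 10, 10]
  else if days ≤ 1 then []  -- totality guard, outside Pre_
  else
    let candles := candleLighting (days - 1)
    let upto := min (days - 1) 9
    (PySem.List.pyRange 0 upto 1).foldl
      (fun cs i => cs.set i.toNat (max (cs.getD i.toNat 0 - 1) 0)) candles
termination_by (days - 1).toNat
decreasing_by
  simp only [not_le] at *
  omega

-- ===== PORT B =====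
def candleLighting_alt (days : Int) : List Int :=
  (List.range 9).map (fun i => max (min (11 - days + (i : Int)) 10) 0)

-- ===== PRECONDITION & SPEC =====
-- Pre_ excludes days < 1, on which the Python A never terminates (RecursionError).
def Pre_candleLighting (days : Int) : Prop := 1 ≤ days
instance (days : Int) : Decidable (Pre_candleLighting days) := by unfold Pre_candleLighting; infer_instance
def pvWitness_candleLighting : Int := (3)
def Spec_candleLighting (days : Int) (out : List Int) : Prop := out = candleLighting_alt days
instance (days : Int) (out : List Int) : Decidable (Spec_candleLighting days out) := by unfold Spec_candleLighting; infer_instance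

-- ===== CLAIM (what is proved, stated in full; the proofs are below) =====
def Claim_equal_candleLighting : Prop := ∀ (days : Int), Dom_candleLighting days → Pre_candleLighting days → Spec_candleLighting days (candleLighting days)

-- ===== LEMMAS AND PROOFS =====

-- one recursive step of A, applied to the closed form for d-1, yields the closed form for d
lemma candle_step (d : Int) (hd : 2 ≤ d) :
    (PySem.List.pyRange 0 (min (d - 1) 9) 1).foldl
      (fun cs i => cs.set i.toNat (max (cs.getD i.toNat 0 - 1) 0)) (candleLighting_alt (d - 1))
    = candleLighting_alt d := by
  by_cases h : d ≤ 10
  · interval_cases d <;> decide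
  · have hmin : min (d - 1) 9 = 9 := by omega
    rw [hmin]
    have hrange : PySem.List.pyRange 0 9 1 = [0, 1, 2, 3, 4, 5, 6, 7, 8] := by decide
    rw [hrange]
    simp [candleLighting_alt, List.range_succ]
    omega

lemma candle_main (n : Nat) : candleLighting ((n : Int) + 1) = candleLighting_alt ((n : Int) + 1) := by
  induction n with
  | zero =>
    rw [candleLighting]
    norm_num
    decide
  | succ m ih =>
    rw [candleLighting]
    push_cast
    have h1 : ¬ ((m : Int) + 1 + 1 = 1) := by omega
    have h2 : ¬ ((m : Int) + 1 + 1 ≤ 1) := by omega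
    rw [if_neg h1, if_neg h2]
    have he : (m : Int) + 1 + 1 - 1 = (m : Int) + 1 := by ring
    have hs := candle_step ((m : Int) + 1 + 1) (by omega)
    rw [he] at hs
    rw [he, ih]
    exact hs

-- ===== VERDICT (by name: the statement is the Claim_ definition above) =====
theorem candleLighting_spec : Claim_equal_candleLighting := by
  intro days _ hpre
  unfold Spec_candleLighting
  have h : days = ((days - 1).toNat : Int) + 1 := by
    unfold Pre_candleLighting at hpre; omega
  rw [h, candle_main]
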